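-- pv_equiv track=rewrite | github.com/mohmedayman/sfedump-clientside | Screens/Decoder/decoder.py | octal_decode
-- ===== SOURCE A (Python) =====
-- def octal_decode(encoded_value):
--     try:
--         octal_values = encoded_value.split()
--         return ''.join(chr(int(octal, 8)) for octal in octal_values)
--     except:
--         decimal_result = ""
--         current_octal = ""
--
--         for char in encoded_value:
--             if char in ('0', '1', '2', '3', '4', '5', '6', '7'):
--                 current_octal += char
--             else:
--                 if current_octal:
--                     decimal_result += str(int(current_octal, 8))
--                     current_octal = ""
--                 decimal_result += char
--
--         if current_octal:
--             decimal_result += str(int(current_octal, 8))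
--
--         return decimal_result
-- ===== SOURCE B (Python) =====
-- def octal_decode(encoded_value):
--     try:
--         return ''.join(chr(int(octal, 8)) for octal in encoded_value.split())
--     except:
--         pieces = []
--         i, n = 0, len(encoded_value)
--         while i < n:
--             j = i
--             while j < n and encoded_value[j] in '01234567':
--                 j += 1
--             if j > i:
--                 pieces.append(str(int(encoded_value[i:j], 8)))
--                 i = j
--             else:
--                 pieces.append(encoded_value[i])
--                 i += 1
--         return ''.join(pieces)
-- ===== Notes on version B (the rewrite author's own statement) =====
-- stated objective: alternative
-- what changed: The except-branch char-by-char accumulator state machine (current_octal/decimal_result string concatenation) is replaced by a two-pointer scan that finds each maximal octal-digit run, converts it with one slice, and joins the collected pieces; the try path is unchanged.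
import Mathlib
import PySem

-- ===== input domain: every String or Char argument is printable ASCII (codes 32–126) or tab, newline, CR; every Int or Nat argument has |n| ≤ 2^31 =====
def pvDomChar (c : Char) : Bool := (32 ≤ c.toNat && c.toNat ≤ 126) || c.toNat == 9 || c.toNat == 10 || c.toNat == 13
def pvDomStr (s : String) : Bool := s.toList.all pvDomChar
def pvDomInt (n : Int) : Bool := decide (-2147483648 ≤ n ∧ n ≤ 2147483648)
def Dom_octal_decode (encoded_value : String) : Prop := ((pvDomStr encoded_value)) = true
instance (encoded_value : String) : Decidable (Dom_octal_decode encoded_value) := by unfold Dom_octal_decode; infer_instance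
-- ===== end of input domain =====

-- B replaces A's char-by-char accumulator state machine in the except branch by a
-- two-pointer scan over maximal octal-digit runs (alternative decomposition, same cost).

-- shared helpers: both Pythons' try blocks are literally identical, and both call int(·, 8) / str(·)
-- `char in ('0',…,'7')` (A) and `char in '01234567'` (B): same 8-character membership test
def pvIsOct (c : Char) : Bool := ['0', '1', '2', '3', '4', '5', '6', '7'].contains c

-- str(int(run, 8)) for a run of octal digits (int(run, 8) always succeeds there; getD 0 unreachable)
def pvOctStr (run : List Char) : List Char :=
  PySem.Int.toChars ((PySem.Int.ofCharsBase? run 8).getD 0)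

-- the try block of BOTH Pythons: ''.join(chr(int(octal, 8)) for octal in encoded_value.split());
-- none = some int() or chr() call raised (ValueError), i.e. Python enters the except branch.
-- chr(v) is Char.ofNat v.toNat, exact for 0 ≤ v < 0x110000 outside the surrogate range (see Pre_).
def pvTryPath (encoded_value : String) : Option (List Char) :=
  (PySem.Str.split₀ encoded_value).foldl
    (fun acc tok =>
      match acc, PySem.Int.ofStrBase? tok 8 with
      | some cs, some v =>
          if 0 ≤ v ∧ v < 1114112 then some (cs ++ [Char.ofNat v.toNat]) else none
      | _, _ => none)
    (some [])

-- ===== PORT A =====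
-- except branch: for char in encoded_value, state (decimal_result, current_octal)
def pvStepA (st : List Char × List Char) (c : Char) : List Char × List Char :=
  if pvIsOct c then (st.1, st.2 ++ [c])
  else ((if st.2 ≠ [] then st.1 ++ pvOctStr st.2 else st.1) ++ [c], [])

-- trailing `if current_octal:` flush
def pvFinA (st : List Char × List Char) : List Char :=
  if st.2 ≠ [] then st.1 ++ pvOctStr st.2 else st.1

def octal_decode (encoded_value : String) : String :=
  match pvTryPath encoded_value with
  | some cs => String.ofList cs
  | none => String.ofList (pvFinA (encoded_value.toList.foldl pvStepA ([], [])))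

-- ===== PORT B =====
-- the outer while over positions i: at an octal digit, the inner `while j … j += 1` plus the
-- slice encoded_value[i:j] is the maximal octal run (takeWhile/dropWhile on the suffix at i)
def pvScanB : List Char → List (List Char)
  | [] => []
  | c :: rest =>
    if pvIsOct c then
      pvOctStr ((c :: rest).takeWhile pvIsOct) :: pvScanB ((c :: rest).dropWhile pvIsOct)
    else
      [c] :: pvScanB rest
termination_by cs => cs.length
decreasing_by
  · simp only [List.dropWhile_cons, *, if_pos]
    exact Nat.lt_succ_of_le (List.length_dropWhile_le _ _)
  · simp

def octal_decode_alt (encoded_value : String) : String :=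
  match pvTryPath encoded_value with
  | some cs => String.ofList cs
  | none => String.ofList (PySem.Chars.join [] (pvScanB encoded_value.toList))

-- ===== PRECONDITION & SPEC =====
-- Pre_ excludes only inputs whose try path succeeds with some chr() argument in the lone-surrogate
-- range 0xD800–0xDFFF: there Python A (and B) return a string Lean's Char/String cannot represent.
def Pre_octal_decode (encoded_value : String) : Prop :=
  ∀ tok ∈ PySem.Str.split₀ encoded_value,
    (match PySem.Int.ofStrBase? tok 8 with
     | some v => decide (v < 55296 ∨ 57343 < v)
     | none => true) = true
instance (encoded_value : String) : Decidable (Pre_octal_decode encoded_value) := by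
  unfold Pre_octal_decode; infer_instance

def pvWitness_octal_decode : String := "101 102"

def Spec_octal_decode (encoded_value : String) (out : String) : Prop := out = octal_decode_alt encoded_value
instance (encoded_value : String) (out : String) : Decidable (Spec_octal_decode encoded_value out) := by unfold Spec_octal_decode; infer_instance

-- ===== CLAIM (what is proved, stated in full; the proofs are below) =====
def Claim_equal_octal_decode : Prop := ∀ (encoded_value : String), Dom_octal_decode encoded_value → Pre_octal_decode encoded_value → Spec_octal_decode encoded_value (octal_decode encoded_value)

-- ===== LEMMAS AND PROOFS =====

-- the already-emitted prefix `dec` of A's state is inert: it is only ever appended to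
lemma pvFinA_foldl_shift (cs : List Char) :
    ∀ (dec cur : List Char),
      pvFinA (cs.foldl pvStepA (dec, cur)) = dec ++ pvFinA (cs.foldl pvStepA ([], cur)) := by
  induction cs with
  | nil =>
    intro dec cur
    simp only [List.foldl_nil, pvFinA]
    split_ifs <;> simp
  | cons c cs ih =>
    intro dec cur
    by_cases h : pvIsOct c = true
    · have h1 : ∀ d, (c :: cs).foldl pvStepA (d, cur) = cs.foldl pvStepA (d, cur ++ [c]) := by
        intro d; simp [pvStepA, h]
      rw [h1, h1, ih dec (cur ++ [c])]
    · by_cases hc : cur = []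
      · have h1 : ∀ d, (c :: cs).foldl pvStepA (d, cur) = cs.foldl pvStepA (d ++ [c], []) := by
          intro d; simp [pvStepA, h, hc]
        rw [h1, h1, ih (dec ++ [c]) [], ih ([] ++ [c]) []]
        simp
      · have h1 : ∀ d, (c :: cs).foldl pvStepA (d, cur) =
            cs.foldl pvStepA (d ++ pvOctStr cur ++ [c], []) := by
          intro d; simp [pvStepA, h, hc]
        rw [h1, h1, ih (dec ++ pvOctStr cur ++ [c]) [], ih ([] ++ pvOctStr cur ++ [c]) []]
        simp
-- a nonempty pending run `cur` absorbs the maximal octal-digit prefix of the rest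
lemma pvFinA_run (cs : List Char) :
    ∀ (cur : List Char), cur ≠ [] →
      pvFinA (cs.foldl pvStepA ([], cur)) =
        pvOctStr (cur ++ cs.takeWhile pvIsOct) ++ pvFinA ((cs.dropWhile pvIsOct).foldl pvStepA ([], [])) := by
  induction cs with
  | nil =>
    intro cur hcur
    simp [pvFinA, hcur]
  | cons c cs ih =>
    intro cur hcur
    by_cases h : pvIsOct c = true
    · have h1 : (c :: cs).foldl pvStepA ([], cur) = cs.foldl pvStepA ([], cur ++ [c]) := by
        simp [pvStepA, h]
      rw [h1, ih (cur ++ [c]) (by simp)]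
      simp [h]
    · have h1 : (c :: cs).foldl pvStepA ([], cur) = cs.foldl pvStepA (pvOctStr cur ++ [c], []) := by
        simp [pvStepA, h, hcur]
      have h2 : (c :: cs).foldl pvStepA ([], []) = cs.foldl pvStepA ([c], []) := by
        simp [pvStepA, h]
      rw [h1, pvFinA_foldl_shift cs (pvOctStr cur ++ [c]) []]
      simp only [List.takeWhile_cons_of_neg h, List.dropWhile_cons_of_neg h]
      rw [h2, pvFinA_foldl_shift cs [c] []]
      simp

-- A's accumulator scan equals B's run-by-run scan
lemma pvScanAB (cs : List Char) :
    pvFinA (cs.foldl pvStepA ([], [])) = (pvScanB cs).flatten := by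
  induction cs using pvScanB.induct with
  | case1 => simp [pvFinA, pvScanB]
  | case2 c rest h ih =>
    rw [pvScanB]
    simp only [h, if_pos, List.flatten_cons]
    have h1 : (c :: rest).foldl pvStepA ([], []) = rest.foldl pvStepA ([], [c]) := by
      simp [pvStepA, h]
    simp only [List.dropWhile_cons_of_pos h] at ih
    rw [h1, pvFinA_run rest [c] (by simp),
      List.takeWhile_cons_of_pos h, List.dropWhile_cons_of_pos h, ih]
    simp
  | case3 c rest h ih =>
    rw [pvScanB]
    simp only [h, Bool.false_eq_true, if_neg, not_false_iff, List.flatten_cons]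
    have h1 : (c :: rest).foldl pvStepA ([], []) = rest.foldl pvStepA ([c], []) := by
      simp [pvStepA, h]
    rw [h1, pvFinA_foldl_shift rest [c] [], ih]

-- ''.join(pieces): the empty separator makes Chars.join a plain concatenation
lemma pvJoinNil (xss : List (List Char)) : PySem.Chars.join [] xss = xss.flatten := by
  induction xss with
  | nil => simp [PySem.Chars.join_nil]
  | cons x xs ih =>
    cases xs with
    | nil => simp [PySem.Chars.join_singleton]
    | cons y ys => rw [PySem.Chars.join_cons_cons, ih]; simp

-- ===== VERDICT (by name: the statement is the Claim_ definition above) =====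
theorem octal_decode_spec : Claim_equal_octal_decode := by
  intro s _ _
  unfold Spec_octal_decode octal_decode octal_decode_alt
  cases pvTryPath s with
  | some cs => rfl
  | none => rw [pvJoinNil, pvScanAB]
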